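-- pv_equiv track=rewrite | github.com/MrBrantCode/unitest_baseline | mut_generate/mist_train_taco/taco_6955/solution.py | count_transform_ways
-- ===== SOURCE A (Python) =====
-- def count_transform_ways(start: str, end: str, k: int) -> int:
--     from collections import deque
--     from math import gcd
--
--     mod = 10**9 + 7
--     n = len(start)
--
--     if k == 0:
--         return 1 if start == end else 0
--
--     s1 = deque(start)
--     s2 = deque(end)
--
--     n1pow = [1]
--     for i in range(696969):
--         n1pow.append(n1pow[-1] * (n - 1) % mod)
--
--     ans0 = 0
--     for i in range(1, k):
--         ans0 = (n1pow[i] - ans0) % mod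
--
--     ans1 = 1
--     for i in range(1, k):
--         ans1 = (n1pow[i] - ans1) % mod
--
--     total = 0
--     for t in range(n):
--         if s1 == s2:
--             total += ans1 if t else ans0
--         s1.appendleft(s1.pop())
--
--     return total % mod
-- ===== SOURCE B (Python) =====
-- def count_transform_ways(start: str, end: str, k: int) -> int:
--     mod = 10**9 + 7
--     n = len(start)
--
--     if k == 0:
--         return 1 if start == end else 0
--     if len(end) != n:
--         return 0  # rotations keep the length, so nothing can match
--
--     # Closed form of the alternating recurrence: with q = n-1, r = -q and m = k-1
--     # steps, ans0 = (-1)^m * (r + r^2 + ... + r^m) and ans1 = ans0 + (-1)^m (mod p).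
--     # The geometric sum is computed in O(log m) by doubling: G(2t) = G(t)*(1+r^t).
--     m = k - 1 if k > 1 else 0
--     r = (-(n - 1)) % mod
--
--     def geo(e):
--         # returns (r + r^2 + ... + r^e mod p, r^e mod p)
--         if e == 0:
--             return 0, 1
--         if e % 2 == 1:
--             g, p = geo(e - 1)
--             return (g + p * r) % mod, p * r % mod
--         g, p = geo(e // 2)
--         return g * (1 + p) % mod, p * p % mod
--
--     g, _ = geo(m)
--     sign = 1 if m % 2 == 0 else mod - 1
--     ans0 = sign * g % mod
--     ans1 = (ans0 + sign) % mod
--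
--     # Rotations of start are the length-n windows of start+start at offsets 1..n
--     # (offset n is the identity rotation); enumerate the matching offsets with find.
--     doubled = start + start
--     matched = 0
--     first = 0
--     pos = doubled.find(end, 1)
--     while 0 <= pos <= n:
--         matched += 1
--         if pos == n:
--             first = 1
--         pos = doubled.find(end, pos + 1)
--
--     return (first * ans0 + (matched - first) * ans1) % mod
-- ===== Notes on version B (the rewrite author's own statement) =====
-- stated objective: faster
-- what changed: B replaces A's O(k) alternating recurrence (run after unconditionally building a 696969-entry power table) with an O(log k) doubling computation of the closed-form geometric sum, and replaces A's n full deque-rotation comparisons with enumerating the occurrences of end inside start+start via str.find.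
import Mathlib
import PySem

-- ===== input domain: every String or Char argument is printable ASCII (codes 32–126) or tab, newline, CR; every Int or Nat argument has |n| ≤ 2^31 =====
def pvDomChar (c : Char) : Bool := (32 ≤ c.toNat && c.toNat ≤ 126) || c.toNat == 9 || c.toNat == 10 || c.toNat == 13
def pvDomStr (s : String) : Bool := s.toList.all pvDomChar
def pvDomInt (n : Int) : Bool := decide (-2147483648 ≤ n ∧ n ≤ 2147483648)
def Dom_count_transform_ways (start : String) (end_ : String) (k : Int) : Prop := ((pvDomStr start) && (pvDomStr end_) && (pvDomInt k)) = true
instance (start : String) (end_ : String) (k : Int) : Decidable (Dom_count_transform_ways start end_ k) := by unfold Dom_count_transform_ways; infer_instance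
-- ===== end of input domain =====

-- B replaces A's O(k) recurrence (run after building a fixed 696969-entry power table) by an
-- O(log k) doubling of the geometric sum it has in closed form, and replaces A's n deque
-- rotations + comparisons by enumerating the occurrences of end in start+start with str.find.

-- ===== PORT A =====
-- deque(start) is ported as List Char; s1.pop() is getLast?.getD default (the loop only runs
-- with s1 nonempty, where this is exact); list.append is Array.push (amortized O(1), exact);
-- string equality is compared via toList (exact).
def count_transform_ways (start : String) (end_ : String) (k : Int) : Int :=
  let mod : Int := 10 ^ 9 + 7
  let n : Int := (start.toList.length : Int)
  if k == 0 then (if start.toList == end_.toList then 1 else 0)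
  else
    let s1 := start.toList
    let s2 := end_.toList
    let n1pow : Array Int := (List.range 696969).foldl
      (fun a _ => a.push (PySem.Int.mod (a.back! * (n - 1)) mod)) #[1]
    let ans0 : Int := (PySem.List.pyRange 1 k 1).foldl
      (fun a i => PySem.Int.mod (n1pow.getD i.toNat 0 - a) mod) 0
    let ans1 : Int := (PySem.List.pyRange 1 k 1).foldl
      (fun a i => PySem.Int.mod (n1pow.getD i.toNat 0 - a) mod) 1
    let st := (PySem.List.pyRange 0 n 1).foldl
      (fun (st : List Char × Int) t =>
        let total := if st.1 == s2 then st.2 + (if t == 0 then ans0 else ans1) else st.2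
        (st.1.getLast?.getD default :: st.1.dropLast, total))
      (s1, 0)
    PySem.Int.mod st.2 mod

-- ===== PORT B =====
-- geo(e) of Source B: fuel-guided structural recursion (fuel := e suffices; each call strictly
-- reduces e, so the fuel=0 fallback is never reached).
def pvGeoF (r : Int) : Nat → Nat → Int × Int
  | _, 0 => (0, 1)
  | 0, _ + 1 => (0, 1)
  | f + 1, e + 1 =>
    if (e + 1) % 2 == 1 then
      let gp := pvGeoF r f e
      (PySem.Int.mod (gp.1 + gp.2 * r) (10 ^ 9 + 7), PySem.Int.mod (gp.2 * r) (10 ^ 9 + 7))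
    else
      let gp := pvGeoF r f ((e + 1) / 2)
      (PySem.Int.mod (gp.1 * (1 + gp.2)) (10 ^ 9 + 7), PySem.Int.mod (gp.2 * gp.2) (10 ^ 9 + 7))

def pvGeo (r : Int) (e : Nat) : Int × Int := pvGeoF r e e

-- the while loop of Source B: pos strictly increases, so n.toNat+1 rounds of fuel are enough
def pvScan (hay pat : List Char) (n : Int) : Nat → Int → Int → Int → Int × Int
  | 0, _, matched, first => (matched, first)
  | fuel + 1, pos, matched, first =>
    if 0 ≤ pos ∧ pos ≤ n then
      pvScan hay pat n fuel (PySem.Chars.findFrom hay pat (pos + 1) none)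
        (matched + 1) (if pos == n then 1 else first)
    else (matched, first)

def count_transform_ways_alt (start : String) (end_ : String) (k : Int) : Int :=
  let mod : Int := 10 ^ 9 + 7
  let L := start.toList
  let e := end_.toList
  let n : Int := (L.length : Int)
  if k == 0 then (if L == e then 1 else 0)
  else if ¬ ((e.length : Int) = n) then 0
  else
    let m : Nat := (k - 1).toNat   -- m = k-1 if k > 1 else 0
    let r : Int := PySem.Int.mod (-(n - 1)) mod
    let gp := pvGeo r m
    let sign : Int := if m % 2 == 0 then 1 else mod - 1
    let ans0 := PySem.Int.mod (sign * gp.1) mod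
    let ans1 := PySem.Int.mod (ans0 + sign) mod
    let doubled := L ++ L
    let res := pvScan doubled e n (n.toNat + 1) (PySem.Chars.findFrom doubled e 1 none) 0 0
    PySem.Int.mod (res.2 * ans0 + (res.1 - res.2) * ans1) mod

-- ===== PRECONDITION & SPEC =====
-- Pre_ excludes exactly the inputs where A raises: for k ≥ 696971 the recurrence loop's index
-- k-1 exceeds the 696970-entry power table and Python A raises IndexError.
def Pre_count_transform_ways (start : String) (end_ : String) (k : Int) : Prop := k ≤ 696970
instance (start : String) (end_ : String) (k : Int) : Decidable (Pre_count_transform_ways start end_ k) := by unfold Pre_count_transform_ways; infer_instance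
def pvWitness_count_transform_ways : String × String × Int := ("ab", "ba", 3)

def Spec_count_transform_ways (start : String) (end_ : String) (k : Int) (out : Int) : Prop := out = count_transform_ways_alt start end_ k
instance (start : String) (end_ : String) (k : Int) (out : Int) : Decidable (Spec_count_transform_ways start end_ k out) := by unfold Spec_count_transform_ways; infer_instance

-- ===== CLAIM (what is proved, stated in full; the proofs are below) =====
def Claim_equal_count_transform_ways : Prop := ∀ (start : String) (end_ : String) (k : Int), Dom_count_transform_ways start end_ k → Pre_count_transform_ways start end_ k → Spec_count_transform_ways start end_ k (count_transform_ways start end_ k)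
-- ===== LEMMAS AND PROOFS =====


def pvPw (q : Int) : Nat → Int
  | 0 => 1
  | i + 1 => PySem.Int.mod (pvPw q i * q) (10 ^ 9 + 7)

def pvA (q init : Int) : Nat → Int
  | 0 => init
  | m + 1 => PySem.Int.mod (pvPw q (m + 1) - pvA q init m) (10 ^ 9 + 7)

def pvGz (x : Int) : Nat → Int
  | 0 => 0
  | m + 1 => pvGz x m + x ^ (m + 1)

theorem pvGz_shift (x : Int) (t : Nat) : x * pvGz x t + x = pvGz x t + x ^ (t + 1) := by
  induction t with
  | zero => simp [pvGz]
  | succ t ih => simp only [pvGz]; linear_combination ih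

theorem pvGz_double (x : Int) (t : Nat) : pvGz x (2 * t) = pvGz x t * (1 + x ^ t) := by
  induction t with
  | zero => simp [pvGz]
  | succ t ih =>
    have h2 : 2 * (t + 1) = (2 * t + 1) + 1 := by ring
    rw [h2]
    simp only [pvGz, ih]
    have hxx : x ^ (2 * t) = x ^ t * x ^ t := by rw [two_mul, pow_add]
    linear_combination (-(x ^ t)) * pvGz_shift x t + (3 * x) * hxx

theorem pvModE (a : Int) : PySem.Int.mod a (10 ^ 9 + 7) = a % (10 ^ 9 + 7) :=
  PySem.Int.mod_eq_emod_of_pos (by norm_num)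

theorem pvPw_emod (q : Int) (i : Nat) : pvPw q i = (q ^ i) % (10 ^ 9 + 7) := by
  induction i with
  | zero => norm_num [pvPw]
  | succ i ih =>
    rw [pvPw, pvModE, ih, pow_succ q i]
    conv_rhs => rw [Int.mul_emod]
    rw [Int.mul_emod (q ^ i % (10 ^ 9 + 7)) q]
    simp [Int.emod_emod_of_dvd]

theorem pvA_emod (q init : Int) (hinit : init % (10 ^ 9 + 7) = init) (m : Nat) :
    pvA q init m = ((-1) ^ m * (pvGz (-q) m + init)) % (10 ^ 9 + 7) := by
  induction m with
  | zero => simpa [pvA, pvGz] using hinit.symm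
  | succ m ih =>
    rw [pvA, pvModE, pvPw_emod, ih, ← Int.sub_emod]
    have h : q ^ (m + 1) - (-1) ^ m * (pvGz (-q) m + init)
        = (-1) ^ (m + 1) * (pvGz (-q) (m + 1) + init) := by
      have hsq : ((-1 : Int)) ^ m * (-1) ^ m = 1 := by
        rw [← pow_add]; exact Even.neg_one_pow ⟨m, rfl⟩
      simp only [pvGz]
      linear_combination (-(q ^ (m + 1))) * hsq
    rw [h]

theorem pvGeoF_spec (r : Int) (f : Nat) : ∀ e : Nat, e ≤ f →
    pvGeoF r f e = (pvGz r e % (10 ^ 9 + 7), r ^ e % (10 ^ 9 + 7)) := by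
  induction f with
  | zero =>
    intro e he
    interval_cases e
    norm_num [pvGeoF, pvGz]
  | succ f ih =>
    intro e he
    match e with
    | 0 => norm_num [pvGeoF, pvGz]
    | e + 1 =>
      rw [pvGeoF]
      by_cases hpar : (e + 1) % 2 = 1
      · rw [if_pos (by simpa using hpar), ih e (by omega)]
        simp only [pvModE]
        rw [Prod.mk.injEq]; refine ⟨?_, ?_⟩
        · show (pvGz r e % _ + r ^ e % _ * r) % _ = pvGz r (e + 1) % _
          calc (pvGz r e % (10^9+7) + r ^ e % (10^9+7) * r) % (10^9+7)
              = (pvGz r e + r ^ e * r) % (10^9+7) := by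
                exact Int.ModEq.add (Int.emod_emod_of_dvd _ dvd_rfl)
                  (Int.ModEq.mul (Int.emod_emod_of_dvd _ dvd_rfl) (Int.ModEq.refl r))
            _ = pvGz r (e + 1) % (10^9+7) := by rw [pvGz, pow_succ r e]
        · show (r ^ e % _ * r) % _ = r ^ (e + 1) % _
          calc (r ^ e % (10^9+7) * r) % (10^9+7)
              = (r ^ e * r) % (10^9+7) := Int.ModEq.mul (Int.emod_emod_of_dvd _ dvd_rfl) (Int.ModEq.refl r)
            _ = r ^ (e + 1) % (10^9+7) := by rw [pow_succ r e]
      · rw [if_neg (by simpa using hpar)]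
        have h2 : e + 1 = 2 * ((e + 1) / 2) := by omega
        set t := (e + 1) / 2 with ht
        rw [ih t (by omega)]
        simp only [pvModE]
        rw [Prod.mk.injEq]; refine ⟨?_, ?_⟩
        · show (pvGz r t % _ * (1 + r ^ t % _)) % _ = pvGz r (e + 1) % _
          calc (pvGz r t % (10^9+7) * (1 + r ^ t % (10^9+7))) % (10^9+7)
              = (pvGz r t * (1 + r ^ t)) % (10^9+7) := by
                exact Int.ModEq.mul (Int.emod_emod_of_dvd _ dvd_rfl)
                  (Int.ModEq.add (Int.ModEq.refl 1) (Int.emod_emod_of_dvd _ dvd_rfl))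
            _ = pvGz r (e + 1) % (10^9+7) := by rw [h2, pvGz_double]
        · show (r ^ t % _ * (r ^ t % _)) % _ = r ^ (e + 1) % _
          calc (r ^ t % (10^9+7) * (r ^ t % (10^9+7))) % (10^9+7)
              = (r ^ t * r ^ t) % (10^9+7) :=
                Int.ModEq.mul (Int.emod_emod_of_dvd _ dvd_rfl) (Int.emod_emod_of_dvd _ dvd_rfl)
            _ = r ^ (e + 1) % (10^9+7) := by rw [h2, two_mul, pow_add]

theorem pvGz_modeq (a b : Int) (h : a % (10 ^ 9 + 7) = b % (10 ^ 9 + 7)) (m : Nat) :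
    pvGz a m % (10 ^ 9 + 7) = pvGz b m % (10 ^ 9 + 7) := by
  induction m with
  | zero => rfl
  | succ m ih => exact Int.ModEq.add ih (Int.ModEq.pow _ h)

def pvTbl (q : Int) (m : Nat) : Array Int :=
  (List.range m).foldl (fun a _ => a.push (PySem.Int.mod (a.back! * q) (10 ^ 9 + 7))) #[1]

theorem pvTbl_succ (q : Int) (m : Nat) :
    pvTbl q (m + 1) = (pvTbl q m).push (PySem.Int.mod ((pvTbl q m).back! * q) (10 ^ 9 + 7)) := by
  simp [pvTbl, List.range_succ]

theorem pvTbl_back (q : Int) (m : Nat) : (pvTbl q m).back! = pvPw q m := by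
  induction m with
  | zero => rfl
  | succ m ih => rw [pvTbl_succ, ih]; simp [pvPw]

theorem pvTbl_size (q : Int) (m : Nat) : (pvTbl q m).size = m + 1 := by
  induction m with
  | zero => rfl
  | succ m ih => rw [pvTbl_succ]; simp [ih]

theorem pvTbl_get (q : Int) (m i : Nat) (h : i ≤ m) : (pvTbl q m).getD i 0 = pvPw q i := by
  induction m with
  | zero =>
    interval_cases i
    rfl
  | succ m ih =>
    rw [pvTbl_succ, Array.getD_eq_getD_getElem?, Array.getElem?_push, pvTbl_size]
    rcases Nat.lt_or_ge i (m + 1) with hi | hi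
    · rw [if_neg (by omega), ← Array.getD_eq_getD_getElem?]
      exact ih (by omega)
    · have hie : i = m + 1 := by omega
      subst hie
      rw [if_pos rfl, pvTbl_back]
      simp [pvPw]

theorem pvFoldA (q : Int) (tblv : Array Int)
    (htbl : ∀ i : Nat, i ≤ 696969 → tblv.getD i 0 = pvPw q i) (init : Int)
    (m : Nat) (hm : m ≤ 696969) :
    (PySem.List.pyRange 1 (1 + (m : Int)) 1).foldl
        (fun a i => PySem.Int.mod (tblv.getD i.toNat 0 - a) (10 ^ 9 + 7)) init = pvA q init m := by
  induction m with
  | zero =>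
    rw [show (1 + ((0 : Nat) : Int)) = 1 by norm_num, PySem.List.pyRange_one_eq_nil (by omega)]
    rfl
  | succ m ih =>
    have hsplit : PySem.List.pyRange 1 (1 + ((m + 1 : Nat) : Int)) 1
        = PySem.List.pyRange 1 (1 + (m : Int)) 1 ++ [1 + (m : Int)] := by
      have h : (1 + ((m + 1 : Nat) : Int)) = (1 + (m : Int)) + 1 := by push_cast; ring
      rw [h, PySem.List.pyRange_one_succ_right (by omega)]
    have hget : tblv.getD (1 + (m : Int)).toNat 0 = pvPw q (m + 1) := by
      have h : (1 + (m : Int)).toNat = m + 1 := by omega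
      rw [h]; exact htbl (m + 1) (by omega)
    rw [hsplit]
    simp only [List.foldl_append, List.foldl_cons, List.foldl_nil]
    rw [ih (by omega), hget, pvA]


-- "the length-|pat| window of hay at offset j is pat"
def pvQ (hay pat : List Char) (j : Nat) : Bool := decide (pat <+: hay.drop j)

theorem pvQ_infix {hay pat : List Char} {i j : Nat} (hij : i ≤ j) (h : pvQ hay pat j = true) :
    pat <:+: hay.drop i := by
  simp only [pvQ, decide_eq_true_eq] at h
  have hd : hay.drop j = (hay.drop i).drop (j - i) := by rw [List.drop_drop]; congr 1; omega
  rw [hd] at h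
  exact h.isInfix.trans (List.drop_suffix _ _).isInfix

theorem pvScan_spec (L e : List Char) (hn : 1 ≤ L.length) :
    ∀ (fuel i : Nat) (matched first : Int), 1 ≤ i → i ≤ L.length + 1 →
    L.length + 2 - i ≤ fuel →
    pvScan (L ++ L) e (L.length : Int) fuel
        (PySem.Chars.findFrom (L ++ L) e (i : Int) none) matched first
      = (matched + ((List.range' i (L.length + 1 - i)).countP (pvQ (L ++ L) e) : Int),
         if i ≤ L.length ∧ pvQ (L ++ L) e L.length then 1 else first) := by
  intro fuel
  induction fuel with
  | zero => intro i matched first h1 h2 h3; omega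
  | succ fuel ih =>
    intro i matched first h1 h2 h3
    have hlen2 : (L ++ L).length = 2 * L.length := by simp; omega
    have hk : i ≤ (L ++ L).length := by omega
    by_cases hfind : PySem.Chars.findFrom (L ++ L) e (i : Int) none = -1
    · -- no further occurrence: nothing in [i, L.length] matches
      have hno : ∀ j : Nat, i ≤ j → pvQ (L ++ L) e j = false := by
        intro j hij
        by_contra hq
        have hq' : pvQ (L ++ L) e j = true := by
          revert hq; cases (pvQ (L ++ L) e j) <;> simp
        exact ((PySem.Chars.findFrom_natCast_eq_neg_one_iff (L ++ L) e i hk).mp hfind)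
          (pvQ_infix hij hq')
      rw [hfind]
      show (if 0 ≤ (-1 : Int) ∧ _ then _ else _) = _
      rw [if_neg (by norm_num)]
      have hcnt : (List.range' i (L.length + 1 - i)).countP (pvQ (L ++ L) e) = 0 := by
        rw [List.countP_eq_zero]
        intro j hj
        have := List.mem_range'_1.mp hj
        simp [hno j (by omega)]
      rw [hcnt, if_neg]
      · simp
      · rintro ⟨hin, hQn⟩
        rw [hno L.length (by omega)] at hQn
        exact absurd hQn (by simp)
    · obtain ⟨hge, hpre, hmin⟩ :=
        PySem.Chars.findFrom_natCast_spec (L ++ L) e i hk hfind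
      set pos : Int := PySem.Chars.findFrom (L ++ L) e (i : Int) none with hpos
      have hpos0 : 0 ≤ pos := le_trans (Int.natCast_nonneg i) hge
      have hQpos : pvQ (L ++ L) e pos.toNat = true := by
        simp [pvQ, hpre]
      have hminQ : ∀ j : Nat, i ≤ j → (j : Int) < pos → pvQ (L ++ L) e j = false := by
        intro j hij hjp
        have hj' : j < pos.toNat := by omega
        have := hmin j hij hj'
        simp [pvQ, this]
      have hge' : i ≤ pos.toNat := by omega
      rcases le_or_gt pos (L.length : Int) with hle | hgt
      · -- an occurrence at pos ≤ n: take a loop step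
        rw [pvScan, if_pos ⟨hpos0, hle⟩]
        have hcast : pos + 1 = ((pos.toNat + 1 : Nat) : Int) := by omega
        have hple : pos.toNat ≤ L.length := by omega
        rw [hcast, ih (pos.toNat + 1) (matched + 1) _ (by omega) (by omega) (by omega)]
        have hsplit : List.range' i (L.length + 1 - i)
            = List.range' i (pos.toNat - i) ++ List.range' pos.toNat (L.length + 1 - pos.toNat) := by
          have h := @List.range'_append i (pos.toNat - i) (L.length + 1 - pos.toNat) 1
          simp only [one_mul] at h
          rw [show i + (pos.toNat - i) = pos.toNat by omega] at h
          rw [show (pos.toNat - i) + (L.length + 1 - pos.toNat) = L.length + 1 - i by omega] at h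
          exact h.symm
        have hzero : (List.range' i (pos.toNat - i)).countP (pvQ (L ++ L) e) = 0 := by
          rw [List.countP_eq_zero]
          intro j hj
          have hj' := List.mem_range'_1.mp hj
          simp [hminQ j (by omega) (by omega)]
        have hcons : List.range' pos.toNat (L.length + 1 - pos.toNat)
            = pos.toNat :: List.range' (pos.toNat + 1) (L.length - pos.toNat) := by
          rw [show L.length + 1 - pos.toNat = (L.length - pos.toNat) + 1 by omega]
          exact List.range'_succ
        have hcount : (List.range' i (L.length + 1 - i)).countP (pvQ (L ++ L) e)
            = (List.range' (pos.toNat + 1) (L.length + 1 - (pos.toNat + 1))).countP (pvQ (L ++ L) e) + 1 := by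
          rw [hsplit, List.countP_append, hzero, hcons, List.countP_cons, hQpos]
          simp [show L.length + 1 - (pos.toNat + 1) = L.length - pos.toNat by omega]
        rw [Prod.mk.injEq]
        refine ⟨by rw [hcount]; push_cast; ring, ?_⟩
        have hQat : pos = (L.length : Int) → pvQ (L ++ L) e L.length = true := by
          intro hpeq
          rw [show L.length = pos.toNat by omega]
          exact hQpos
        simp only [beq_iff_eq]
        split_ifs with hC1 hC3 hC2 hC3' hC3''
        · rfl
        · exact absurd ⟨by omega, hC1.2⟩ hC3
        · rfl
        · exact absurd ⟨by omega, hQat hC2⟩ hC3'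
        · exfalso
          have hQn := hC3''.2
          have hA : ¬ (pos.toNat + 1 ≤ L.length) := fun hA => hC1 ⟨hA, hQn⟩
          exact hC2 (by omega)
        · rfl
      · -- next occurrence is beyond n: the loop stops
        rw [pvScan, if_neg (by omega)]
        have hzero : (List.range' i (L.length + 1 - i)).countP (pvQ (L ++ L) e) = 0 := by
          rw [List.countP_eq_zero]
          intro j hj
          have hj' := List.mem_range'_1.mp hj
          simp [hminQ j (by omega) (by omega)]
        rw [hzero, if_neg]
        · simp
        · rintro ⟨hin, hQn⟩
          rw [hminQ L.length (by omega) (by omega)] at hQn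
          exact absurd hQn (by simp)

-- ===== A-side rotation machinery (rotation t of start = window of start++start) =====
def pvRot (L : List Char) (j : Nat) : List Char :=
  L.drop (L.length - j) ++ L.take (L.length - j)

theorem pvRot_zero (L : List Char) : pvRot L 0 = L := by simp [pvRot]

theorem pvSlice_rot (L : List Char) (j : Nat) (hj : j ≤ L.length) :
    PySem.List.slice (L ++ L) (some ((L.length : Int) - (j : Int)))
      (some (2 * (L.length : Int) - (j : Int))) = pvRot L j := by
  have h1 : ((L.length : Int) - (j : Int)) = ((L.length - j : Nat) : Int) := by omega
  have h2 : (2 * (L.length : Int) - (j : Int)) = ((L.length - j : Nat) : Int) + (L.length : Int) := by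
    omega
  rw [h1, h2, PySem.List.slice_natCast_add]
  rw [List.drop_append_of_le_length (by omega), List.take_append]
  have hd : (L.drop (L.length - j)).take L.length = L.drop (L.length - j) :=
    List.take_of_length_le (by simp)
  have hl : (L.drop (L.length - j)).length = j := by simp; omega
  rw [hd, hl, pvRot]

theorem pvRotStepAux (L : List Char) (d : Nat) (h1 : 1 ≤ d) (h2 : d ≤ L.length) :
    ((L.drop d ++ L.take d).getLast?.getD default :: (L.drop d ++ L.take d).dropLast)
      = L.drop (d - 1) ++ L.take (d - 1) := by
  have hlen : (L.take d).length = d := by rw [List.length_take]; omega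
  have htne : L.take d ≠ [] := by
    intro h
    rw [h] at hlen
    simp at hlen
    omega
  have hlast : (L.drop d ++ L.take d).getLast? = some L[d - 1] := by
    rw [List.getLast?_append_of_ne_nil _ htne, List.getLast?_eq_getElem?, hlen,
      List.getElem?_take_of_lt (by omega), List.getElem?_eq_getElem (by omega)]
  have hdrop : (L.drop d ++ L.take d).dropLast = L.drop d ++ L.take (d - 1) := by
    rw [List.dropLast_append_of_ne_nil htne, List.dropLast_eq_take, List.take_take,
      List.length_take]
    have hmin : min (min d L.length - 1) d = d - 1 := by omega
    rw [hmin]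
  have hdd : L.drop (d - 1) = L[d - 1] :: L.drop d := by
    have hstep := List.drop_eq_getElem_cons (l := L) (i := d - 1) (by omega)
    have hsucc : d - 1 + 1 = d := by omega
    rwa [hsucc] at hstep
  rw [hlast, hdrop, hdd]
  simp

theorem pvRot_step (L : List Char) (j : Nat) (hj : j < L.length) :
    ((pvRot L j).getLast?.getD default :: (pvRot L j).dropLast) = pvRot L (j + 1) := by
  have h := pvRotStepAux L (L.length - j) (by omega) (by omega)
  rw [pvRot, pvRot]
  have e1 : L.length - j - 1 = L.length - (j + 1) := by omega
  rw [e1] at h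
  exact h

-- the rotation loop of A equals a loop over windows of start ++ start
theorem pvLoopEq (L s2 : List Char) (ans0 ans1 : Int) (c j : Nat) (hc : j + c = L.length) (tot : Int) :
    ((PySem.List.pyRange (j : Int) ((L.length : Int)) 1).foldl
        (fun (st : List Char × Int) t =>
          (st.1.getLast?.getD default :: st.1.dropLast,
           if st.1 == s2 then st.2 + (if t == 0 then ans0 else ans1) else st.2))
        (pvRot L j, tot)).2
    = (PySem.List.pyRange (j : Int) ((L.length : Int)) 1).foldl
        (fun tot t =>
          if PySem.List.slice (L ++ L) (some ((L.length : Int) - t)) (some (2 * (L.length : Int) - t)) == s2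
          then tot + (if t == 0 then ans0 else ans1) else tot) tot := by
  induction c generalizing j tot with
  | zero =>
    have h : (j : Int) = (L.length : Int) := by omega
    rw [h, PySem.List.pyRange_one_eq_nil (by omega)]
    simp
  | succ c ih =>
    have hj : (j : Int) < (L.length : Int) := by omega
    rw [PySem.List.pyRange_one_cons hj]
    simp only [List.foldl_cons]
    have hguard : (PySem.List.slice (L ++ L) (some ((L.length : Int) - (j : Int)))
        (some (2 * (L.length : Int) - (j : Int))) == s2) = (pvRot L j == s2) := by
      rw [pvSlice_rot L j (by omega)]
    rw [hguard, pvRot_step L j (by omega)]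
    have hcast : (j : Int) + 1 = ((j + 1 : Nat) : Int) := by push_cast; ring
    rw [hcast]
    exact ih (j + 1) (by omega) _

theorem pvLoopEq0 (L s2 : List Char) (ans0 ans1 : Int) (tot : Int) :
    ((PySem.List.pyRange 0 ((L.length : Int)) 1).foldl
        (fun (st : List Char × Int) t =>
          (st.1.getLast?.getD default :: st.1.dropLast,
           if st.1 == s2 then st.2 + (if t == 0 then ans0 else ans1) else st.2))
        (L, tot)).2
    = (PySem.List.pyRange 0 ((L.length : Int)) 1).foldl
        (fun tot t =>
          if PySem.List.slice (L ++ L) (some ((L.length : Int) - t)) (some (2 * (L.length : Int) - t)) == s2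
          then tot + (if t == 0 then ans0 else ans1) else tot) tot := by
  have h := pvLoopEq L s2 ans0 ans1 L.length 0 (by omega) tot
  rw [pvRot_zero] at h
  simpa using h

-- 'if match: total += w(t)' over a list is: total + sum of w over the matching t
theorem pvFoldW (l : List Int) (P : Int → Bool) (w : Int → Int) (a : Int) :
    l.foldl (fun tot t => if P t then tot + w t else tot) a
      = a + ((l.filter P).map w).sum := by
  induction l generalizing a with
  | nil => simp
  | cons x l ih => by_cases h : P x <;> simp [h, ih] <;> ring

-- the window at offset j, as A's slice produces it
def pvW (L s2 : List Char) (j : Nat) : Bool := ((L ++ L).drop j).take L.length == s2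

-- A's rotation-scan total in closed form over window matches
theorem pvAtotal (L s2 : List Char) (ans0 ans1 : Int) (hn : 1 ≤ L.length) :
    ((PySem.List.pyRange 0 ((L.length : Int)) 1).foldl
        (fun (st : List Char × Int) t =>
          (st.1.getLast?.getD default :: st.1.dropLast,
           if st.1 == s2 then st.2 + (if t == 0 then ans0 else ans1) else st.2))
        (L, 0)).2
    = (if pvW L s2 L.length then ans0 else 0)
      + ans1 * ((List.range' 1 (L.length - 1)).countP (pvW L s2) : Int) := by
  rw [pvLoopEq0]
  have h0n : (0 : Int) < (L.length : Int) := by omega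
  rw [PySem.List.pyRange_one_cons h0n, List.foldl_cons]
  -- the t = 0 step
  have hsl0 : PySem.List.slice (L ++ L) (some ((L.length : Int) - 0))
      (some (2 * (L.length : Int) - 0)) = ((L ++ L).drop L.length).take L.length := by
    rw [show ((L.length : Int) - 0) = ((L.length : Nat) : Int) by ring,
      show (2 * (L.length : Int) - 0) = ((L.length : Nat) : Int) + ((L.length : Nat) : Int) by ring,
      PySem.List.slice_natCast_add]
  rw [hsl0]
  have hw0 : (((L ++ L).drop L.length).take L.length == s2) = pvW L s2 L.length := rfl
  rw [hw0]
  simp only [show ((0 : Int) == 0) = true from rfl, if_true]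
  rw [pvFoldW]
  -- in range(1, n) the weight is constantly ans1
  have hmap : (((PySem.List.pyRange 1 ((L.length : Int)) 1).filter
        (fun t => PySem.List.slice (L ++ L) (some ((L.length : Int) - t))
          (some (2 * (L.length : Int) - t)) == s2)).map
        (fun t => if t == 0 then ans0 else ans1)).sum
      = ans1 * (((PySem.List.pyRange 1 ((L.length : Int)) 1).countP
          (fun t => PySem.List.slice (L ++ L) (some ((L.length : Int) - t))
            (some (2 * (L.length : Int) - t)) == s2)) : Int) := by
    rw [List.map_congr_left (g := fun _ => ans1) (fun t ht => by
        have hmem := PySem.List.mem_pyRange_one.mp (List.mem_of_mem_filter ht)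
        simp [show ¬ (t = 0) by omega]),
      PySem.List.sum_map_const_int, List.countP_eq_length_filter]
    ring
  simp only [zero_add]
  rw [hmap]
  have hcnt : (PySem.List.pyRange 1 ((L.length : Int)) 1).countP
        (fun t => PySem.List.slice (L ++ L) (some ((L.length : Int) - t))
          (some (2 * (L.length : Int) - t)) == s2)
      = (List.range' 1 (L.length - 1)).countP (pvW L s2) := by
    rw [PySem.List.pyRange_one 1 ((L.length : Int)), List.countP_map,
      show ((L.length : Int) - 1).toNat = L.length - 1 by omega]
    have hptw : ∀ k ∈ List.range (L.length - 1),
        ((fun t => PySem.List.slice (L ++ L) (some ((L.length : Int) - t))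
            (some (2 * (L.length : Int) - t)) == s2) ∘ (fun k : Nat => (1 : Int) + k)) k
          = pvW L s2 (L.length - 1 - k) := by
      intro k hk
      have hklt := List.mem_range.mp hk
      simp only [Function.comp]
      have hb1 : (L.length : Int) - (1 + (k : Int)) = ((L.length - 1 - k : Nat) : Int) := by omega
      have hb2 : 2 * (L.length : Int) - (1 + (k : Int))
          = ((L.length - 1 - k : Nat) : Int) + ((L.length : Nat) : Int) := by omega
      rw [hb1, hb2, PySem.List.slice_natCast_add]
      rfl
    rw [List.countP_congr (fun x hx => by rw [hptw x hx])]
    have hrev : (List.range' 1 (L.length - 1)).reverse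
        = (List.range (L.length - 1)).map (fun k => L.length - 1 - k) := by
      rw [List.reverse_range']
      apply List.map_congr_left
      intro k hk
      have := List.mem_range.mp hk
      omega
    calc (List.range (L.length - 1)).countP (fun k => pvW L s2 (L.length - 1 - k))
        = ((List.range (L.length - 1)).map (fun k => L.length - 1 - k)).countP (pvW L s2) := by
          rw [List.countP_map]; rfl
      _ = ((List.range' 1 (L.length - 1)).reverse).countP (pvW L s2) := by rw [hrev]
      _ = (List.range' 1 (L.length - 1)).countP (pvW L s2) := List.countP_reverse
  rw [hcnt]

-- window == e is the prefix test when the lengths agree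
theorem pvW_eq_pvQ (L e : List Char) (hlen : e.length = L.length) (j : Nat) :
    pvW L e j = pvQ (L ++ L) e j := by
  have h : (e <+: (L ++ L).drop j) ↔ (((L ++ L).drop j).take L.length = e) := by
    rw [List.prefix_iff_eq_take, hlen]
    exact ⟨fun x => x.symm, fun x => x.symm⟩
  simp only [pvW, pvQ]
  by_cases hc : ((L ++ L).drop j).take L.length = e
  · simp [hc, h.mpr hc]
  · rw [beq_eq_false_iff_ne.mpr hc, decide_eq_false (fun hp => hc (h.mp hp))]

-- no window of length |L| can equal e when the lengths differ
theorem pvW_false_of_len (L e : List Char) (j : Nat) (hj : j ≤ L.length)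
    (hne : e.length ≠ L.length) : pvW L e j = false := by
  simp only [pvW, beq_eq_false_iff_ne, ne_eq]
  intro h
  apply hne
  rw [← h, List.length_take, List.length_drop, List.length_append]
  omega

-- ===== VERDICT (by name: the statement is the Claim_ definition above) =====
set_option maxRecDepth 8000 in
theorem count_transform_ways_spec : Claim_equal_count_transform_ways := by
  intro start end_ k _ hpre
  unfold Pre_count_transform_ways at hpre
  unfold Spec_count_transform_ways count_transform_ways count_transform_ways_alt
  by_cases hk : k == 0
  · simp only [hk, if_pos]
  · simp only [hk, Bool.false_eq_true, if_false]
    have hk0 : ¬ k = 0 := by simpa using hk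
    set L := start.toList with hL
    set e := end_.toList with he
    set q : Int := (L.length : Int) - 1 with hq
    set m : Nat := (k - 1).toNat with hm
    -- A's two recurrence folds are pvA q 0 m and pvA q 1 m
    have htbl : ∀ i : Nat, i ≤ 696969 →
        ((List.range 696969).foldl
          (fun a _ => a.push (PySem.Int.mod (a.back! * q) (10 ^ 9 + 7))) #[1]).getD i 0 = pvPw q i :=
      fun i hi => pvTbl_get q 696969 i hi
    have hfold : ∀ init : Int, (PySem.List.pyRange 1 k 1).foldl
        (fun a i => PySem.Int.mod
          (((List.range 696969).foldl
            (fun a _ => a.push (PySem.Int.mod (a.back! * q) (10 ^ 9 + 7))) #[1]).getD i.toNat 0 - a)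
          (10 ^ 9 + 7)) init = pvA q init m := by
      intro init
      by_cases hk1 : k ≤ 1
      · rw [PySem.List.pyRange_one_eq_nil (by omega)]
        have : m = 0 := by omega
        rw [this]
        rfl
      · have hkm : k = 1 + (m : Int) := by omega
        rw [hkm]
        exact pvFoldA q _ htbl init m (by omega)
    rw [hfold 0, hfold 1]
    -- B's ans0/ans1 equal A's pvA values
    set r : Int := PySem.Int.mod (-((L.length : Int) - 1)) (10 ^ 9 + 7) with hr
    have hgeo : pvGeo r m = (pvGz r m % (10 ^ 9 + 7), r ^ m % (10 ^ 9 + 7)) :=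
      pvGeoF_spec r m m le_rfl
    set sign : Int := if m % 2 == 0 then (1 : Int) else 10 ^ 9 + 7 - 1 with hsign
    have hsgn : sign % (10 ^ 9 + 7) = (-1) ^ m % (10 ^ 9 + 7) := by
      rcases Nat.even_or_odd m with hpar | hpar
      · have h2 : m % 2 = 0 := Nat.even_iff.mp hpar
        simp only [hsign, h2, Even.neg_one_pow hpar]
        norm_num
      · have h2 : m % 2 = 1 := Nat.odd_iff.mp hpar
        simp only [hsign, h2, Odd.neg_one_pow hpar]
        norm_num
    have hrq : r % (10 ^ 9 + 7) = (-q) % (10 ^ 9 + 7) := by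
      rw [hr, pvModE]
      exact Int.emod_emod_of_dvd _ dvd_rfl
    have hGz : pvGz r m % (10 ^ 9 + 7) = pvGz (-q) m % (10 ^ 9 + 7) :=
      pvGz_modeq r (-q) hrq m
    have hans0 : PySem.Int.mod (sign * (pvGeo r m).1) (10 ^ 9 + 7) = pvA q 0 m := by
      rw [hgeo, pvModE, pvA_emod q 0 (by norm_num) m]
      calc (sign * (pvGz r m % (10 ^ 9 + 7))) % (10 ^ 9 + 7)
          = ((-1) ^ m * pvGz (-q) m) % (10 ^ 9 + 7) :=
            Int.ModEq.mul hsgn ((Int.emod_emod_of_dvd _ dvd_rfl).trans hGz)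
        _ = ((-1) ^ m * (pvGz (-q) m + 0)) % (10 ^ 9 + 7) := by ring_nf
    have hans1 : PySem.Int.mod (PySem.Int.mod (sign * (pvGeo r m).1) (10 ^ 9 + 7) + sign) (10 ^ 9 + 7) = pvA q 1 m := by
      rw [hans0, pvModE, pvA_emod q 1 (by norm_num) m, pvA_emod q 0 (by norm_num) m]
      calc (((-1) ^ m * (pvGz (-q) m + 0)) % (10 ^ 9 + 7) + sign) % (10 ^ 9 + 7)
          = ((-1) ^ m * (pvGz (-q) m + 0) + (-1) ^ m) % (10 ^ 9 + 7) :=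
            Int.ModEq.add (Int.emod_emod_of_dvd _ dvd_rfl) hsgn
        _ = ((-1) ^ m * (pvGz (-q) m + 1)) % (10 ^ 9 + 7) := by ring_nf
    by_cases hn0 : L.length = 0
    · -- empty start: A's rotation loop is empty; B finds no occurrence
      have hLnil : L = [] := List.length_eq_zero_iff.mp hn0
      simp only [hLnil]
      rw [show ((([] : List Char).length : Int)) = 0 from rfl,
        PySem.List.pyRange_one_eq_nil (le_refl 0)]
      simp only [List.foldl_nil]
      by_cases he0 : e = []
      · simp only [he0]
        rw [if_neg (by norm_num)]
        have hf : PySem.Chars.findFrom (([] : List Char) ++ []) [] (1 : Int) none = -1 := by decide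
        rw [hf, show Int.toNat 0 + 1 = 1 from rfl]
        rw [show pvScan (([] : List Char) ++ []) [] 0 1 (-1) 0 0 = (0, 0) from by
          rw [pvScan, if_neg (by norm_num)]]
        norm_num [pvModE]
      · rw [if_pos (by
          intro hcontra
          exact he0 (List.length_eq_zero_iff.mp (by exact_mod_cast hcontra))), pvModE]
        norm_num
    · have hn1 : 1 ≤ L.length := by omega
      rw [pvAtotal L e (pvA q 0 m) (pvA q 1 m) hn1]
      by_cases hlen : (e.length : Int) = (L.length : Int)
      · have hlenN : e.length = L.length := by exact_mod_cast hlen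
        conv_rhs => rw [if_neg (not_not_intro hlen)]
        rw [hans1, hans0]
        have hscan := pvScan_spec L e hn1 (L.length + 1) 1 0 0 le_rfl (by omega) (by omega)
        norm_num at hscan
        rw [show (((L.length : Int))).toNat = L.length from by omega, hscan]
        -- counts: [1..n] splits as [1..n-1] ++ [n]
        have hsplit : List.range' 1 L.length = List.range' 1 (L.length - 1) ++ [L.length] := by
          have h := @List.range'_append 1 (L.length - 1) 1 1
          simp only [one_mul] at h
          rw [show 1 + (L.length - 1) = L.length by omega] at h
          rw [show (L.length - 1) + 1 = L.length by omega] at h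
          rw [← h, List.range'_one]
        have hWQ : (List.range' 1 (L.length - 1)).countP (pvW L e)
            = (List.range' 1 (L.length - 1)).countP (pvQ (L ++ L) e) :=
          List.countP_congr (fun x _ => by rw [pvW_eq_pvQ L e hlenN])
        rw [pvW_eq_pvQ L e hlenN, hWQ, hsplit, List.countP_append]
        by_cases hQ : pvQ (L ++ L) e L.length = true
        · rw [if_pos hQ, if_pos ⟨hn1, hQ⟩]
          rw [show (List.countP (pvQ (L ++ L) e) [L.length]) = 1 from by simp [hQ]]
          congr 1
          push_cast
          ring
        · rw [if_neg hQ, if_neg (by exact fun h => hQ h.2)]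
          rw [show (List.countP (pvQ (L ++ L) e) [L.length]) = 0 from by
            simp [List.countP_cons]
            revert hQ
            cases (pvQ (L ++ L) e L.length) <;> simp]
          congr 1
          push_cast
          ring
      · conv_rhs => rw [if_pos hlen]
        have hlenN : e.length ≠ L.length := fun h => hlen (by exact_mod_cast congrArg Nat.cast h)
        rw [pvW_false_of_len L e L.length le_rfl hlenN]
        have hz : (List.range' 1 (L.length - 1)).countP (pvW L e) = 0 := by
          rw [List.countP_eq_zero]
          intro j hj
          have := List.mem_range'_1.mp hj
          simp [pvW_false_of_len L e j (by omega) hlenN]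
        rw [hz]
        norm_num [pvModE]
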